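-- pv_equiv track=rewrite | github.com/msteralexis/BachelorDIM-Lectures-Algorithms-2019 | S1_algotools_teacherdemo.py | reverse_table2
-- ===== SOURCE A (Python) =====
-- def reverse_table2(table):
--     if not(isinstance(table, list)):
--         raise ValueError( ' il faut passer une liste')
--     nb_element_able_div_2=(int((len(table)) /2)) -1
--     i=0
--     compt=len(table)-1
--     while i <= nb_element_able_div_2:
--         stock=table[i]
--         table[i]=table[compt]
--         table[compt]=stock
--         compt=compt-1
--         i=i+1
--     return table
-- ===== SOURCE B (Python) =====
-- def reverse_table2(table):
--     if not(isinstance(table, list)):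
--         raise ValueError( ' il faut passer une liste')
--     table[:] = table[::-1]
--     return table
-- ===== Notes on version B (the rewrite author's own statement) =====
-- stated objective: simpler
-- what changed: The manual two-pointer swap loop is replaced by a single in-place slice assignment table[:] = table[::-1] (build reversed copy, bulk-assign back); same in-place mutation and return value.
import Mathlib
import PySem

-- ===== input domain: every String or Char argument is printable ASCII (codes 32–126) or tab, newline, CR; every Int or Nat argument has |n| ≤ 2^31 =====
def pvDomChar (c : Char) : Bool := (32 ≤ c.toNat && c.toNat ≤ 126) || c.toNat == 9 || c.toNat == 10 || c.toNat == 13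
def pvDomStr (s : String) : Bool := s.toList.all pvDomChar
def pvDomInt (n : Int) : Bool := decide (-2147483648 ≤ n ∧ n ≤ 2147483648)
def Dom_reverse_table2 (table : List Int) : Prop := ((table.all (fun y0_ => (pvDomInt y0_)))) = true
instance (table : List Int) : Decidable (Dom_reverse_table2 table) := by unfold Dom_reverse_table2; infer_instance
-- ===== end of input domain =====

-- B replaces A's manual two-pointer swap loop with one in-place slice assignment
-- table[:] = table[::-1] (simpler); both mutate the list in place and return it —
-- the theorem here is about the return value.


-- ===== PORT A =====
-- the while loop: fuel = number of iterations = nb_element_able_div_2 + 1 = len/2;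
-- all indices touched are in range, so getD/set are exact here
def revLoopA (t : List Int) (i compt : Nat) : Nat → List Int
  | 0 => t
  | fuel + 1 =>
    let stock := t.getD i 0
    let t1 := t.set i (t.getD compt 0)
    let t2 := t1.set compt stock
    revLoopA t2 (i + 1) (compt - 1) fuel

def reverse_table2 (table : List Int) : List Int :=
  revLoopA table 0 (table.length - 1) (table.length / 2)

-- ===== PORT B =====
-- table[::-1]; step -1 ≠ 0 so slice? is always `some`, getD [] is exact
def reverse_table2_alt (table : List Int) : List Int :=
  (PySem.List.slice? table none none (-1)).getD []

-- ===== PRECONDITION & SPEC =====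
def Spec_reverse_table2 (table : List Int) (out : List Int) : Prop := out = reverse_table2_alt table
instance (table : List Int) (out : List Int) : Decidable (Spec_reverse_table2 table out) := by unfold Spec_reverse_table2; infer_instance

-- ===== CLAIM (what is proved, stated in full; the proofs are below) =====
def Claim_equal_reverse_table2 : Prop := ∀ (table : List Int), Dom_reverse_table2 table → Spec_reverse_table2 table (reverse_table2 table)

-- ===== LEMMAS AND PROOFS =====

-- loop invariant: the loop run on pre ++ mid ++ suf with i at mid's start, compt at
-- mid's end and fuel = ⌊|mid|/2⌋ reverses exactly mid
theorem revLoopA_eq_aux (n : Nat) (mid pre suf : List Int) (hn : mid.length ≤ n) :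
    revLoopA (pre ++ mid ++ suf) pre.length (pre.length + mid.length - 1) (mid.length / 2)
      = pre ++ mid.reverse ++ suf := by
  induction n generalizing mid pre suf with
  | zero =>
    have : mid = [] := by cases mid <;> simp_all
    simp [this, revLoopA]
  | succ n ih =>
    match hm : mid with
    | [] => simp [revLoopA]
    | [x] => simp [revLoopA]
    | x :: y :: rest =>
      obtain ⟨ys, z, hz⟩ := (y :: rest).eq_nil_or_concat.resolve_left (by simp)
      have hys : ys.length = rest.length := by
        have := congrArg List.length hz; simp at this; omega
      rw [hz]
      simp only [List.concat_eq_append]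
      have hlen : (x :: (ys ++ [z])).length / 2 = ys.length / 2 + 1 := by
        simp; omega
      rw [hlen, revLoopA]
      have hget1 : (pre ++ (x :: (ys ++ [z])) ++ suf).getD pre.length 0 = x := by
        simp [List.getD_eq_getElem?_getD]
      have hc : pre.length + (x :: (ys ++ [z])).length - 1
          = pre.length + (1 + ys.length) := by simp; omega
      have hget2 : (pre ++ (x :: (ys ++ [z])) ++ suf).getD (pre.length + (1 + ys.length)) 0 = z := by
        have h0 : pre ++ (x :: (ys ++ [z])) ++ suf = (pre ++ x :: ys) ++ (z :: suf) := by simp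
        rw [List.getD_eq_getElem?_getD, h0, List.getElem?_append_right (by simp)]
        have h1 : pre.length + (1 + ys.length) - (pre ++ x :: ys).length = 0 := by simp; omega
        rw [h1]; simp
      have hset1 : (pre ++ (x :: (ys ++ [z])) ++ suf).set pre.length z
          = pre ++ (z :: (ys ++ [z])) ++ suf := by
        simp
      have hset2 : (pre ++ (z :: (ys ++ [z])) ++ suf).set (pre.length + (1 + ys.length)) x
          = pre ++ (z :: (ys ++ [x])) ++ suf := by
        have h1 : pre ++ (z :: (ys ++ [z])) ++ suf = (pre ++ z :: ys) ++ ([z] ++ suf) := by simp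
        have h2 : pre ++ (z :: (ys ++ [x])) ++ suf = (pre ++ z :: ys) ++ ([x] ++ suf) := by simp
        rw [h1, h2, List.set_append, if_neg (by simp)]
        have h0 : pre.length + (1 + ys.length) - (pre ++ z :: ys).length = 0 := by simp; omega
        rw [h0]; simp
      rw [hc, hget1, hget2, hset1, hset2]
      have hre : pre ++ (z :: (ys ++ [x])) ++ suf = (pre ++ [z]) ++ ys ++ (x :: suf) := by simp
      have hi : pre.length + 1 = (pre ++ [z]).length := by simp
      have hcc : pre.length + (1 + ys.length) - 1 = (pre ++ [z]).length + ys.length - 1 := by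
        simp; omega
      rw [hre, hi, hcc, ih ys (pre ++ [z]) (x :: suf) (by simp at hn; omega)]
      simp

theorem reverse_table2_spec : Claim_equal_reverse_table2 := by
  intro table _
  unfold Spec_reverse_table2 reverse_table2 reverse_table2_alt
  rw [PySem.List.slice?_none_none_neg_one]
  have := revLoopA_eq_aux table.length table [] [] le_rfl
  simpa using this
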